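-- pv_equiv track=rewrite | github.com/rodrigobn/Python | Lista de exercicio 5 (Lista e Matrizes)/matrizes.py | criaMatrizTriangularInferior
-- ===== SOURCE A (Python) =====
-- def criaMatrizZerada(linha, coluna):
-- 	"""
-- 	Cria uma Matriz de dimensão linha x coluna com valores 0
-- 	"""
-- 	matriz = []
-- 	for i in range(linha):
-- 		matriz.append([0] * coluna)
--
-- 	return matriz
--
-- def criaMatrizTriangularInferior(matriz):
-- 	"""
--   Cria uma matriz nova a partir de outra matriz zerando todos os elementos acima da diagonal principal
--   """
-- 	matrizTriangularInferior = criaMatrizZerada(len(matriz),len(matriz[0]))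
--
-- 	linhaDiagonal = 0
-- 	colunaDiagonal = 0
-- 	for linha in range(len(matriz)):
-- 		for coluna in range(len(matriz[0])):
-- 			if linha + coluna > linhaDiagonal + colunaDiagonal:
-- 				matrizTriangularInferior[linha][coluna] = 0
-- 			else:
-- 				matrizTriangularInferior[linha][coluna] = matriz[linha][coluna]
-- 		linhaDiagonal += 1
-- 		colunaDiagonal += 1
-- 	return matrizTriangularInferior
-- ===== SOURCE B (Python) =====
-- def criaMatrizTriangularInferior(matriz):
--     cols = len(matriz[0])
--     resultado = []
--     for i, linha in enumerate(matriz):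
--         k = min(i + 1, cols)
--         resultado.append(linha[:k] + [0] * (cols - k))
--     return resultado
-- ===== Notes on version B (the rewrite author's own statement) =====
-- stated objective: faster
-- what changed: B replaces A's zero-matrix construction followed by a per-cell conditional assignment over all n*m cells with a single pass that builds each output row directly as the copied lower-triangle prefix concatenated with zeros, doing no per-cell branch and no in-place cell updates.
import Mathlib
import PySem

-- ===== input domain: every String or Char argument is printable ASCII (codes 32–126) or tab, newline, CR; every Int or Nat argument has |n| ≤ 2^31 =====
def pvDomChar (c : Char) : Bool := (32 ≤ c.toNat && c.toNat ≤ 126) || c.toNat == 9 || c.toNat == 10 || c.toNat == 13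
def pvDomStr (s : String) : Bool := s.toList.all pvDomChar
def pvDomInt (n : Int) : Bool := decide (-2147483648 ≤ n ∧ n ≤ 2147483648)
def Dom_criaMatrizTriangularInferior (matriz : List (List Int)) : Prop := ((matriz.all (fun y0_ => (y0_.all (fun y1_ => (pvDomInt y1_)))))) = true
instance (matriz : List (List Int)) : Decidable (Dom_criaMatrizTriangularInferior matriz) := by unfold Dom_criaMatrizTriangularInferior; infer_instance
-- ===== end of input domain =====

-- B builds each output row directly (copied prefix ++ zeros) instead of A's zero-matrix
-- construction followed by a per-cell conditional assignment.

-- ===== PORT A =====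
-- helper criaMatrizZerada: matriz = []; for i in range(linha): matriz.append([0]*coluna)
def criaMatrizZerada (linha coluna : Int) : List (List Int) :=
  (PySem.List.pyRange 0 linha 1).foldl
    (fun m _ => m ++ [List.replicate coluna.toNat 0]) []

-- inner loop body: matrizTriangularInferior[linha][coluna] = … (indices come from range, hence ≥ 0: set at .toNat is exact)
def pvInnerStep (matriz : List (List Int)) (diag : Int × Int) (linha : Int)
    (m : List (List Int)) (coluna : Int) : List (List Int) :=
  let v : Int :=
    if linha + coluna > diag.1 + diag.2 then 0
    else PySem.List.pyGetD (PySem.List.pyGetD matriz linha []) coluna 0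
  m.set linha.toNat ((PySem.List.pyGetD m linha []).set coluna.toNat v)

def criaMatrizTriangularInferior (matriz : List (List Int)) : List (List Int) :=
  let cols : Int := ((PySem.List.pyGetD matriz 0 []).length : Int)
  ((PySem.List.pyRange 0 (matriz.length : Int) 1).foldl
    (fun (st : List (List Int) × Int × Int) linha =>
      ((PySem.List.pyRange 0 cols 1).foldl (pvInnerStep matriz st.2 linha) st.1,
       st.2.1 + 1, st.2.2 + 1))
    (criaMatrizZerada (matriz.length : Int) cols, 0, 0)).1

-- ===== PORT B =====
def criaMatrizTriangularInferior_alt (matriz : List (List Int)) : List (List Int) :=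
  let cols : Int := ((PySem.List.pyGetD matriz 0 []).length : Int)
  (PySem.List.enumerate matriz 0).foldl
    (fun res p =>
      let k : Int := min (p.1 + 1) cols
      res ++ [PySem.List.slice p.2 none (some k) ++ List.replicate (cols - k).toNat 0])
    []

-- ===== PRECONDITION & SPEC =====
-- Pre_ excludes exactly the inputs on which Python A raises IndexError: the empty
-- matrix (matriz[0]) and matrices where some row i is shorter than min(i+1, len(matriz[0])).
def Pre_criaMatrizTriangularInferior (matriz : List (List Int)) : Prop :=
  matriz ≠ [] ∧
  ∀ p ∈ PySem.List.enumerate matriz 0, (min (p.1 + 1) ((matriz.headD []).length : Int)).toNat ≤ p.2.length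
instance (matriz : List (List Int)) : Decidable (Pre_criaMatrizTriangularInferior matriz) := by
  unfold Pre_criaMatrizTriangularInferior; infer_instance

def pvWitness_criaMatrizTriangularInferior : List (List Int) := [[1, 2, 3], [4, 5, 6], [7, 8, 9]]

def Spec_criaMatrizTriangularInferior (matriz : List (List Int)) (out : List (List Int)) : Prop := out = criaMatrizTriangularInferior_alt matriz
instance (matriz : List (List Int)) (out : List (List Int)) : Decidable (Spec_criaMatrizTriangularInferior matriz out) := by unfold Spec_criaMatrizTriangularInferior; infer_instance

-- ===== CLAIM (what is proved, stated in full; the proofs are below) =====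
def Claim_equal_criaMatrizTriangularInferior : Prop := ∀ (matriz : List (List Int)), Dom_criaMatrizTriangularInferior matriz → Pre_criaMatrizTriangularInferior matriz → Spec_criaMatrizTriangularInferior matriz (criaMatrizTriangularInferior matriz)

-- ===== LEMMAS AND PROOFS =====

-- row i of A's result, as a closed form
def pvRowB (matriz : List (List Int)) (c i : Nat) : List Int :=
  (List.range c).map (fun (j : Nat) =>
    if (i : Int) + (j : Int) > (i : Int) + (i : Int) then 0
    else PySem.List.pyGetD (PySem.List.pyGetD matriz (i : Int) []) ((j : Nat) : Int) 0)

theorem pvZerada (n : Nat) (c : Int) :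
    criaMatrizZerada (n : Int) c = List.replicate n (List.replicate c.toNat 0) := by
  unfold criaMatrizZerada
  rw [PySem.List.pyRange_zero_nat, List.foldl_map,
      PySem.List.foldl_append_singleton_eq_map (fun _ => List.replicate c.toNat 0)]
  simp [List.map_const']

theorem pvSetShift (g : Nat → Int) : ∀ (l : List Nat) (y : Int) (xs : List Int),
    l.foldl (fun a j => a.set (j+1) (g j)) (y :: xs) = y :: l.foldl (fun a j => a.set j (g j)) xs := by
  intro l
  induction l with
  | nil => intro y xs; simp
  | cons j l ih => intro y xs; simp [List.set, ih]

theorem pvFoldSetFull (f : Nat → Int) : ∀ (r : List Int),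
    (List.range r.length).foldl (fun a j => a.set j (f j)) r = (List.range r.length).map f := by
  intro r
  induction r generalizing f with
  | nil => simp
  | cons x xs ih =>
    simp only [List.length_cons, List.range_succ_eq_map, List.foldl_cons, List.foldl_map,
      List.map_cons, List.map_map]
    have h0 : (x :: xs).set 0 (f 0) = f 0 :: xs := by simp [List.set]
    rw [h0]
    have := pvSetShift (fun j => f (j+1)) (List.range xs.length) (f 0) xs
    simp only [Nat.succ_eq_add_one] at *
    rw [this, ih (fun j => f (j+1))]
    rfl

theorem pvGetSet (m : List (List Int)) (lt : Nat) (h : lt < m.length) (r : List Int) :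
    PySem.List.pyGetD (m.set lt r) ((lt : Int)) [] = r := by
  simp [PySem.List.pyGetD_natCast, List.getD, h]

theorem pvInnerExtract (g : Nat → Int) (lt : Nat) :
    ∀ (l : List Nat) (m : List (List Int)), lt < m.length →
      l.foldl (fun m j => m.set lt ((PySem.List.pyGetD m ((lt : Int)) []).set j (g j))) m
      = m.set lt (l.foldl (fun r j => r.set j (g j)) (PySem.List.pyGetD m ((lt : Int)) [])) := by
  intro l
  induction l with
  | nil =>
    intro m h
    simp only [List.foldl_nil]
    rw [PySem.List.pyGetD_natCast, List.getD_eq_getElem _ _ (by exact_mod_cast h)]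
    simp
  | cons j l ih =>
    intro m h
    simp only [List.foldl_cons]
    rw [ih _ (by simpa using h), pvGetSet m lt h, List.set_set]

theorem pvInnerLoop (matriz : List (List Int)) (c lt : Nat) (m : List (List Int))
    (hlt : lt < m.length) (hrow : PySem.List.pyGetD m ((lt : Int)) [] = List.replicate c 0) :
    (PySem.List.pyRange 0 (c : Int) 1).foldl (pvInnerStep matriz ((lt : Int), (lt : Int)) (lt : Int)) m
    = m.set lt (pvRowB matriz c lt) := by
  rw [PySem.List.pyRange_zero_nat, List.foldl_map]
  simp only [pvInnerStep, Int.toNat_natCast]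
  rw [pvInnerExtract _ lt (List.range c) m hlt, hrow]
  have hf := pvFoldSetFull (fun j => if (lt : Int) + (j : Int) > (lt : Int) + (lt : Int) then 0
    else PySem.List.pyGetD (PySem.List.pyGetD matriz ((lt : Int)) []) ((j : Int)) 0)
    (List.replicate c 0)
  rw [List.length_replicate] at hf
  rw [hf, pvRowB]

theorem pvOuterInv (matriz : List (List Int)) (c : Nat) :
    ∀ (k : Nat), k ≤ matriz.length →
      (List.range k).foldl
        (fun (st : List (List Int) × Int × Int) (i : Nat) =>
          ((PySem.List.pyRange 0 ((c : Nat) : Int) 1).foldl (pvInnerStep matriz st.2 ((i : Nat) : Int)) st.1,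
           st.2.1 + 1, st.2.2 + 1))
        (List.replicate matriz.length (List.replicate c 0), 0, 0)
      = ((List.range k).map (pvRowB matriz c)
          ++ List.replicate (matriz.length - k) (List.replicate c 0), (k : Int), (k : Int)) := by
  intro k
  induction k with
  | zero => intro _; simp
  | succ k ih =>
    intro hk
    have hk' : k < matriz.length := Nat.lt_of_succ_le hk
    rw [List.range_succ, List.foldl_append, ih (Nat.le_of_lt hk')]
    simp only [List.foldl_cons, List.foldl_nil]
    have hlen : k < ((List.range k).map (pvRowB matriz c)
        ++ List.replicate (matriz.length - k) (List.replicate c 0)).length := by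
      simp; omega
    have hrow : PySem.List.pyGetD ((List.range k).map (pvRowB matriz c)
        ++ List.replicate (matriz.length - k) (List.replicate c 0)) ((k : Int)) []
        = List.replicate c 0 := by
      rw [PySem.List.pyGetD_natCast, List.getD_eq_getElem _ _ (by exact_mod_cast hlen)]
      rw [List.getElem_append_right (by simp)]
      simp
    rw [pvInnerLoop matriz c k _ hlen hrow]
    have hset : ((List.range k).map (pvRowB matriz c)
        ++ List.replicate (matriz.length - k) (List.replicate c 0)).set k (pvRowB matriz c k)
        = (List.range (k+1)).map (pvRowB matriz c)
          ++ List.replicate (matriz.length - (k+1)) (List.replicate c 0) := by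
      have hd : matriz.length - k = (matriz.length - (k+1)) + 1 := by omega
      rw [hd, List.replicate_succ, List.range_succ, List.map_append]
      simp
    rw [hset]
    simp only [Prod.mk.injEq]
    refine ⟨by rw [List.range_succ], by push_cast; ring, by push_cast; ring⟩

theorem pvPortA (matriz : List (List Int)) :
    criaMatrizTriangularInferior matriz
    = (List.range matriz.length).map (pvRowB matriz (PySem.List.pyGetD matriz 0 []).length) := by
  simp only [criaMatrizTriangularInferior]
  rw [pvZerada, Int.toNat_natCast, PySem.List.pyRange_zero_nat matriz.length, List.foldl_map,
      pvOuterInv matriz _ matriz.length le_rfl]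
  simp

theorem pvRowEq (matriz : List (List Int)) (row : List Int) (c i : Nat)
    (hget : PySem.List.pyGetD matriz ((i : Nat) : Int) [] = row)
    (hr : min (i + 1) c ≤ row.length) :
    pvRowB matriz c i
    = PySem.List.slice row none (some (min ((i : Int) + 1) ((c : Nat) : Int)))
      ++ List.replicate ((((c : Nat) : Int) - min ((i : Int) + 1) ((c : Nat) : Int))).toNat 0 := by
  have hmin : min ((i : Int) + 1) ((c : Nat) : Int) = (((min (i + 1) c : Nat)) : Int) := by
    push_cast; simp
  rw [hmin, PySem.List.slice_to_natCast]
  have htn : ((((c : Nat) : Int) - (((min (i + 1) c : Nat)) : Int)).toNat) = c - min (i + 1) c := by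
    omega
  rw [htn]
  apply List.ext_getElem
  · simp [pvRowB]; omega
  · intro j hj1 hj2
    have hjc : j < c := by simpa [pvRowB] using hj1
    simp only [pvRowB, List.getElem_map, List.getElem_range]
    by_cases hcase : j < min (i + 1) c
    · rw [List.getElem_append_left (by simp [List.length_take]; omega)]
      rw [List.getElem_take]
      have hno : ¬ ((i : Int) + (j : Int) > (i : Int) + (i : Int)) := by omega
      rw [if_neg hno, hget, PySem.List.pyGetD_natCast, List.getD_eq_getElem _ _ (by omega)]
    · rw [List.getElem_append_right (by simp [List.length_take]; omega)]
      simp only [List.getElem_replicate]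
      have hyes : (i : Int) + (j : Int) > (i : Int) + (i : Int) := by omega
      rw [if_pos hyes]

-- ===== VERDICT (by name: the statement is the Claim_ definition above) =====
theorem criaMatrizTriangularInferior_spec : Claim_equal_criaMatrizTriangularInferior := by
  intro matriz _ hpre
  obtain ⟨hne, hlen⟩ := hpre
  unfold Spec_criaMatrizTriangularInferior criaMatrizTriangularInferior_alt
  rw [PySem.List.foldl_append_singleton_eq_map, List.nil_append, pvPortA]
  apply List.ext_getElem
  · simp [PySem.List.length_enumerate]
  · intro i h1 h2
    have hi : i < matriz.length := by simpa using h1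
    simp only [List.getElem_map, List.getElem_range, PySem.List.getElem_enumerate, zero_add]
    have hc : (matriz.headD []).length = (PySem.List.pyGetD matriz 0 []).length := by
      cases matriz with
      | nil => exact absurd rfl hne
      | cons a t => simp [PySem.List.pyGetD_zero_cons]
    have hmem : ((i : Int), matriz[i]) ∈ PySem.List.enumerate matriz 0 := by
      have hlt : i < (PySem.List.enumerate matriz 0).length := by
        simpa [PySem.List.length_enumerate] using hi
      have := List.getElem_mem hlt
      simpa [PySem.List.getElem_enumerate] using this
    have hr0 := hlen _ hmem
    rw [hc] at hr0
    have hr : min (i + 1) (PySem.List.pyGetD matriz 0 []).length ≤ matriz[i].length := by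
      simp only at hr0
      omega
    exact pvRowEq matriz matriz[i] _ i
      (by rw [PySem.List.pyGetD_natCast, List.getD_eq_getElem _ _ (by exact_mod_cast hi)]) hr
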